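-- pv_equiv track=rewrite | github.com/pierrot-lc/beautiful_things | tree.py | numero_ligne_fin_etage
-- ===== SOURCE A (Python) =====
-- def numero_ligne_fin_etage(etage):
--     numero_ligne = 0
--     for i in range(etage):#Ajoute toutes les lignes comme si il n'y avait pas de décalage
--         numero_ligne += 4 + i
--     for i in range(1, etage):#Soustrait le décalage en fonction de l'étage traité
--         decalage = i
--         if i%2 == 1:
--             decalage += 1
--         numero_ligne -= int(decalage/2) + 1
--     return numero_ligne
-- ===== SOURCE B (Python) =====
-- def numero_ligne_fin_etage(etage):
--     # Closed form: sum_{i=0}^{n-1}(4+i) - sum_{i=1}^{n-1}(ceil(i/2)+1)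
--     if etage <= 0:
--         return 0
--     n = etage
--     return 4 * n + n * (n - 1) // 2 - (n - 1) - (n * n) // 4
-- ===== Notes on version B (the rewrite author's own statement) =====
-- stated objective: faster
-- what changed: Both accumulation loops are replaced by closed-form arithmetic: the Gauss sum 4n + n(n-1)//2 for the additions and (n-1) + n*n//4 for the subtracted offsets, so B is O(1) instead of O(etage).
import Mathlib
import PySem

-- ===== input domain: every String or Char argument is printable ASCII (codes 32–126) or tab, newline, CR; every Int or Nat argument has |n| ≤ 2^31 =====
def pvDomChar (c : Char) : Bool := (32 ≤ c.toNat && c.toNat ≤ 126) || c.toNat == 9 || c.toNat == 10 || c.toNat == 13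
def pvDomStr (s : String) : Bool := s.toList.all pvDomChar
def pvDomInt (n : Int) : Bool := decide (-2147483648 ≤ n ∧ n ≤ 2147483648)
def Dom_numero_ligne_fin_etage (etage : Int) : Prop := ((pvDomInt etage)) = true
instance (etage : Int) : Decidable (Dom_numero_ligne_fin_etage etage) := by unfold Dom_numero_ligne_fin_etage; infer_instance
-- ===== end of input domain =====

-- B replaces both accumulation loops of A by closed-form arithmetic (Gauss sum and
-- floor(n^2/4)), turning O(etage) into O(1); measurably faster on large inputs.

-- ===== PORT A =====
-- int(decalage/2): Python truncates the float decalage/2; decalage ≥ 1 in the loop and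
-- |decalage| ≤ 2^31 + 1, so the float division is exact and truncation = floor division.
def numero_ligne_fin_etage (etage : Int) : Int :=
  let numero_ligne : Int :=
    (PySem.List.pyRange 0 etage 1).foldl (fun acc i => acc + (4 + i)) 0
  (PySem.List.pyRange 1 etage 1).foldl
    (fun acc i =>
      let decalage := i
      let decalage := if PySem.Int.mod i 2 = 1 then decalage + 1 else decalage
      acc - (PySem.Int.floordiv decalage 2 + 1))
    numero_ligne

-- ===== PORT B =====
def numero_ligne_fin_etage_alt (etage : Int) : Int :=
  if etage ≤ 0 then 0
  else
    4 * etage + PySem.Int.floordiv (etage * (etage - 1)) 2 - (etage - 1)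
      - PySem.Int.floordiv (etage * etage) 4

-- ===== PRECONDITION & SPEC =====
def Spec_numero_ligne_fin_etage (etage : Int) (out : Int) : Prop := out = numero_ligne_fin_etage_alt etage
instance (etage : Int) (out : Int) : Decidable (Spec_numero_ligne_fin_etage etage out) := by unfold Spec_numero_ligne_fin_etage; infer_instance

-- ===== CLAIM (what is proved, stated in full; the proofs are below) =====
def Claim_equal_numero_ligne_fin_etage : Prop := ∀ (etage : Int), Dom_numero_ligne_fin_etage etage → Spec_numero_ligne_fin_etage etage (numero_ligne_fin_etage etage)

-- ===== LEMMAS AND PROOFS =====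

-- First loop: Gauss sum, 0 + Σ_{i=0}^{n-1} (4+i) = 4n + n(n-1)/2.
theorem pv_fold1 (n : Nat) :
    (PySem.List.pyRange 0 (n : Int) 1).foldl (fun acc i => acc + (4 + i)) 0
      = 4 * (n : Int) + ((n : Int) * ((n : Int) - 1)) / 2 := by
  induction n with
  | zero => simp [PySem.List.pyRange_one_eq_nil]
  | succ n ih =>
      have hcast : ((n + 1 : Nat) : Int) = (n : Int) + 1 := by push_cast; ring
      rw [hcast, PySem.List.pyRange_one_succ_right (by positivity), List.foldl_append, ih]
      have h1 : ((n : Int) + 1) * ((n : Int) + 1 - 1) = (n : Int) * ((n : Int) - 1) + 2 * n := by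
        ring
      simp only [List.foldl_cons, List.foldl_nil]
      omega

-- Second loop: Σ_{i=1}^{n-1} (⌈i/2⌉ + 1) = (n-1) + n²/4 for n ≥ 1.
theorem pv_fold2 (n : Nat) (hn : 1 ≤ n) (c : Int) :
    (PySem.List.pyRange 1 (n : Int) 1).foldl
      (fun acc i =>
        let decalage := i
        let decalage := if PySem.Int.mod i 2 = 1 then decalage + 1 else decalage
        acc - (PySem.Int.floordiv decalage 2 + 1)) c
      = c - (((n : Int) - 1) + ((n : Int) * (n : Int)) / 4) := by
  induction n with
  | zero => omega
  | succ n ih =>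
      rcases Nat.lt_or_ge n 1 with h1 | h1
      · -- n = 0 : range(1,1) is empty
        interval_cases n
        simp [PySem.List.pyRange_one_eq_nil]
      · have hcast : ((n + 1 : Nat) : Int) = (n : Int) + 1 := by push_cast; ring
        rw [hcast, PySem.List.pyRange_one_succ_right (by exact_mod_cast h1),
          List.foldl_append, ih h1]
        simp only [List.foldl]
        rw [PySem.Int.mod_eq_emod_of_pos (by norm_num),
          PySem.Int.floordiv_eq_ediv_of_pos (by norm_num)]
        rcases Int.even_or_odd (n : Int) with ⟨k, hk⟩ | ⟨k, hk⟩
        · have hsq : (n : Int) * (n : Int) = 4 * (k * k) := by rw [hk]; ring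
          have hsq' : ((n : Int) + 1) * ((n : Int) + 1) = 4 * (k * k) + 4 * k + 1 := by
            rw [hk]; ring
          split_ifs with hpar <;> omega
        · have hsq : (n : Int) * (n : Int) = 4 * (k * k) + 4 * k + 1 := by rw [hk]; ring
          have hsq' : ((n : Int) + 1) * ((n : Int) + 1) = 4 * (k * k + 2 * k + 1) := by
            rw [hk]; ring
          split_ifs with hpar <;> omega

-- ===== VERDICT (by name: the statement is the Claim_ definition above) =====
theorem numero_ligne_fin_etage_spec : Claim_equal_numero_ligne_fin_etage := by
  intro etage _
  unfold Spec_numero_ligne_fin_etage numero_ligne_fin_etage numero_ligne_fin_etage_alt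
  by_cases h : etage ≤ 0
  · rw [PySem.List.pyRange_one_eq_nil h, PySem.List.pyRange_one_eq_nil (by omega)]
    simp [h]
  · obtain ⟨n, rfl⟩ : ∃ n : Nat, etage = (n : Int) :=
      ⟨etage.toNat, (Int.toNat_of_nonneg (by omega)).symm⟩
    have hn : 1 ≤ n := by omega
    rw [pv_fold1, pv_fold2 n hn]
    rw [if_neg h,
      PySem.Int.floordiv_eq_ediv_of_pos (by norm_num : (0:Int) < 2),
      PySem.Int.floordiv_eq_ediv_of_pos (by norm_num : (0:Int) < 4)]
    ring_nf
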